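-- pv_equiv track=rewrite | github.com/GoCommitOwO/AP-CS-Principles | MSOE/MSOE-2015-7.py | split_into_triangle_components
-- ===== SOURCE A (Python) =====
-- def generate_triangle_numbers(n):
--     triangle_numbers = []
--     total = 0
--     for i in range(1, n + 1):
--         total += i
--         triangle_numbers.append(total)
--     return triangle_numbers
--
-- def split_into_triangle_components(num):
--     triangle_nums = generate_triangle_numbers(num)
--     components = []
--     while num > 0:
--         found = False
--         for i in reversed(triangle_nums):
--             if num >= i:
--                 components.append(i)
--                 num -= i
--                 found = True
--                 break
--         if not found:
--             components.append(0)  # append zero if no triangle number found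
--     return components
-- ===== SOURCE B (Python) =====
-- def split_into_triangle_components(num):
--     # Generate only the triangle numbers <= num (about sqrt(2*num) of them),
--     # then scan them once from largest to smallest, taking each as often as it fits.
--     tris = []
--     t = 0
--     i = 0
--     while t + i + 1 <= num:
--         i += 1
--         t += i
--         tris.append(t)
--     components = []
--     r = num
--     for t in reversed(tris):
--         while r >= t:
--             components.append(t)
--             r -= t
--     return components
-- ===== Notes on version B (the rewrite author's own statement) =====
-- stated objective: faster
-- what changed: B generates only the O(sqrt(num)) triangle numbers not exceeding num (instead of num of them) and then makes a single descending pass taking each triangle number as often as it fits, instead of rescanning the whole reversed list from the top on every greedy step.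
import Mathlib
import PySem

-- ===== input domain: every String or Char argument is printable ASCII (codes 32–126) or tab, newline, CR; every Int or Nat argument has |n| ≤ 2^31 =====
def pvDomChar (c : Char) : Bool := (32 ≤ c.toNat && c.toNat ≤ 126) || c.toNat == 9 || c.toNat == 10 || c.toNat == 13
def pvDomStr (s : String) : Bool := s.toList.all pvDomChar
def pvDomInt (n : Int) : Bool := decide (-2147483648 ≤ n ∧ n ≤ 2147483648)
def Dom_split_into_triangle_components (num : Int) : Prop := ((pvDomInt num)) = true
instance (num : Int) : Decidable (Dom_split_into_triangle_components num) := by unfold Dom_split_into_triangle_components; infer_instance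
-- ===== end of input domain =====

-- B generates only the triangle numbers ≤ num and takes each greedily in one descending pass,
-- instead of generating num triangle numbers and rescanning the reversed list on every step (objective: faster).


-- ===== PORT A =====
-- generate_triangle_numbers: fold of 'for i in range(1, n+1): total += i; triangle_numbers.append(total)'
def pvGenA (n : Int) : List Int :=
  ((PySem.List.pyRange 1 (n + 1) 1).foldl
    (fun (st : List Int × Int) i => (st.1 ++ [st.2 + i], st.2 + i)) ([], 0)).1

-- the while-loop of A; 'reversed(triangle_nums)' is the same list on every iteration, so it is
-- taken as the parameter d.  The two bail-out branches ('found' element ≤ 0, or no element found)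
-- only make the recursion total: on them Python's loop would never terminate, and they are
-- unreachable from the entry point (the generated list consists of positive numbers and contains 1).
def pvCoreA (d : List Int) (num : Int) : List Int :=
  if hr : 0 < num then
    match hf : d.find? (fun i => i ≤ num) with
    | some i => if hi : 0 < i then i :: pvCoreA d (num - i) else [0]
    | none => [0]
  else []
termination_by num.toNat
decreasing_by omega

def split_into_triangle_components (num : Int) : List Int :=
  let triangle_nums := pvGenA num
  pvCoreA triangle_nums.reverse num

-- ===== PORT B =====
-- 'while t + i + 1 <= num: i += 1; t += i; tris.append(t)'  (i counts iterations, so it is a Nat)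
def pvBuild (num t : Int) (i : Nat) : List Int :=
  if h : t + i + 1 ≤ num then (t + i + 1) :: pvBuild num (t + i + 1) (i + 1) else []
termination_by (num - t).toNat
decreasing_by omega

-- inner 'while r >= t: components.append(t); r -= t'; returns (appended components, final r).
-- The '0 < t' conjunct only makes the recursion total (all generated triangle numbers are positive).
def pvTake (t r : Int) : List Int × Int :=
  if h : 0 < t ∧ t ≤ r then
    let p := pvTake t (r - t)
    (t :: p.1, p.2)
  else ([], r)
termination_by r.toNat
decreasing_by omega

-- 'for t in reversed(tris): …' over the already-reversed list
def pvLoopB : List Int → Int → List Int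
  | [], _ => []
  | t :: rest, r =>
    let p := pvTake t r
    p.1 ++ pvLoopB rest p.2

def split_into_triangle_components_alt (num : Int) : List Int :=
  let tris := pvBuild num 0 0
  pvLoopB tris.reverse num

-- ===== PRECONDITION & SPEC =====
def Spec_split_into_triangle_components (num : Int) (out : List Int) : Prop := out = split_into_triangle_components_alt num
instance (num : Int) (out : List Int) : Decidable (Spec_split_into_triangle_components num out) := by unfold Spec_split_into_triangle_components; infer_instance

-- ===== CLAIM (what is proved, stated in full; the proofs are below) =====
def Claim_equal_split_into_triangle_components : Prop := ∀ (num : Int), Dom_split_into_triangle_components num → Spec_split_into_triangle_components num (split_into_triangle_components num)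

-- ===== LEMMAS AND PROOFS =====

-- reference greedy: repeatedly take the head while it fits, else drop it (list is descending)
def pvGreedy : List Int → Int → List Int
  | [], _ => []
  | t :: rest, r =>
    if h : 0 < t ∧ t ≤ r then t :: pvGreedy (t :: rest) (r - t)
    else pvGreedy rest r
termination_by l r => (r.toNat, l.length)
decreasing_by
  · apply Prod.Lex.left; omega
  · apply Prod.Lex.right; simp

-- closed recursive form of A's generator: pvGA2 a b t = triangle partial sums for indices a..b-1
def pvGA2 (a b t : Int) : List Int :=
  if h : a < b then (t + a) :: pvGA2 (a + 1) b (t + a) else []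
termination_by (b - a).toNat
decreasing_by omega

theorem pvGenA_fold (b : Int) : ∀ (fuel : Nat) (a t : Int) (acc : List Int), (b - a).toNat ≤ fuel →
    ((PySem.List.pyRange a b 1).foldl
      (fun (st : List Int × Int) i => (st.1 ++ [st.2 + i], st.2 + i)) (acc, t)).1
    = acc ++ pvGA2 a b t := by
  intro fuel
  induction fuel with
  | zero =>
    intro a t acc h
    rw [PySem.List.pyRange_one_eq_nil (by omega), pvGA2]
    simp [show ¬ a < b by omega]
  | succ k ih =>
    intro a t acc h
    by_cases hab : a < b
    · rw [PySem.List.pyRange_one_cons hab, pvGA2]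
      simp only [List.foldl_cons, hab, dif_pos]
      rw [ih (a + 1) (t + a) (acc ++ [t + a]) (by omega)]
      simp
    · rw [PySem.List.pyRange_one_eq_nil (by omega), pvGA2]
      simp [hab]

theorem pvGenA_eq (n : Int) : pvGenA n = pvGA2 1 (n + 1) 0 := by
  unfold pvGenA
  exact pvGenA_fold (n + 1) (n + 1 - 1).toNat 1 0 [] (by omega)

theorem pvGA2_pos : ∀ (a b t : Int), 1 ≤ a → 0 ≤ t → ∀ x ∈ pvGA2 a b t, 0 < x := by
  intro a b t
  fun_induction pvGA2 a b t with
  | case1 a t hab ih =>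
    intro ha ht x hx
    rw [List.mem_cons] at hx
    rcases hx with h | h
    · omega
    · exact ih (by omega) (by omega) x h
  | case2 => simp

theorem pvGA2_gt : ∀ (a b t : Int), 0 ≤ a → b - 1 < t + a → ∀ x ∈ pvGA2 a b t, b - 1 < x := by
  intro a b t
  fun_induction pvGA2 a b t with
  | case1 a t hab ih =>
    intro ha ht x hx
    rw [List.mem_cons] at hx
    rcases hx with h | h
    · omega
    · exact ih (by omega) (by omega) x h
  | case2 => simp

theorem pvGA2_one_mem (n : Int) (hn : 0 < n) : (1 : Int) ∈ pvGA2 1 (n + 1) 0 := by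
  rw [pvGA2]
  simp [show (1:Int) < n + 1 by omega]

-- A's generated list = B's generated list ++ a tail of numbers all exceeding num
theorem pvDecomp (n : Int) : ∀ (fuel : Nat) (i : Nat) (t : Int), (n - i).toNat ≤ fuel → 0 ≤ t →
    ∃ E, pvGA2 (i + 1) (n + 1) t = pvBuild n t i ++ E ∧ ∀ x ∈ E, n < x := by
  intro fuel
  induction fuel with
  | zero =>
    intro i t hf ht
    by_cases hab : (i : Int) + 1 < n + 1
    · omega
    · rw [pvGA2, pvBuild]
      refine ⟨[], ?_⟩
      simp [show ¬ (i : Int) + 1 < n + 1 from hab, show ¬ t + i + 1 ≤ n by omega]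
  | succ k ih =>
    intro i t hf ht
    by_cases hab : (i : Int) + 1 < n + 1
    · by_cases hb : t + i + 1 ≤ n
      · rw [pvGA2, pvBuild]
        simp only [hab, dif_pos, hb]
        obtain ⟨E, hE1, hE2⟩ := ih (i + 1) (t + ((i : Int) + 1)) (by push_cast; omega) (by push_cast; omega)
        refine ⟨E, ?_, hE2⟩
        push_cast at hE1
        simp only [add_assoc]
        simp only [add_assoc] at hE1
        rw [hE1]
        simp
      · refine ⟨pvGA2 (i + 1) (n + 1) t, ?_, ?_⟩
        · rw [pvBuild]; simp [hb]
        · intro x hx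
          have := pvGA2_gt (i + 1) (n + 1) t (by omega) (by omega) x hx
          omega
    · rw [pvGA2, pvBuild]
      refine ⟨[], ?_⟩
      simp [show ¬ (i : Int) + 1 < n + 1 from hab, show ¬ t + i + 1 ≤ n by omega]

-- skipping an element larger than the remainder never changes A's loop
theorem pvCoreA_skip : ∀ (fuel : Nat) (r t : Int) (rest : List Int), r.toNat ≤ fuel →
    (∀ x ∈ rest, 0 < x) → r < t → pvCoreA (t :: rest) r = pvCoreA rest r := by
  intro fuel
  induction fuel with
  | zero =>
    intro r t rest hf hpos hrt
    rw [pvCoreA, pvCoreA]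
    simp [show ¬ 0 < r by omega]
  | succ k ih =>
    intro r t rest hf hpos hrt
    by_cases hr : 0 < r
    · rw [pvCoreA, pvCoreA]
      simp only [hr, dif_pos]
      rw [List.find?_cons_of_neg (by simp; omega)]
      cases hfind : rest.find? (fun i => i ≤ r) with
      | none => rfl
      | some u =>
        have hu : 0 < u := hpos u (List.mem_of_find?_eq_some hfind)
        have hur : u ≤ r := by simpa using List.find?_some hfind
        simp only [hu, dif_pos]
        rw [ih (r - u) t rest (by omega) hpos (by omega)]
    · rw [pvCoreA, pvCoreA]
      simp [hr]

theorem pvCoreA_eq_greedy : ∀ (d : List Int) (r : Int),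
    (∀ x ∈ d, 0 < x) → (0 < r → (1 : Int) ∈ d) → pvCoreA d r = pvGreedy d r := by
  intro d r
  fun_induction pvGreedy d r with
  | case1 r =>
    intro _ h1
    rw [pvCoreA]
    split
    · exact absurd (h1 (by assumption)) (by simp)
    · rfl
  | case2 t rest r h ih =>
    intro hpos h1
    rw [pvCoreA]
    simp only [show 0 < r by omega, dif_pos]
    rw [List.find?_cons_of_pos (by simp; omega)]
    simp only [show 0 < t by omega, dif_pos]
    rw [ih hpos (fun hr => h1 (by omega))]
  | case3 t rest r h ih =>
    intro hpos h1
    have ht : 0 < t := hpos t (by simp)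
    have hrt : r < t := by omega
    rw [pvCoreA_skip r.toNat r t rest (by omega) (fun x hx => hpos x (by simp [hx])) hrt]
    exact ih (fun x hx => hpos x (by simp [hx]))
      (fun hr => by
        have := h1 hr
        rw [List.mem_cons] at this
        rcases this with h' | h'
        · omega
        · exact h')

theorem pvGreedy_take (rest : List Int) : ∀ (t r : Int),
    pvGreedy (t :: rest) r = (pvTake t r).1 ++ pvGreedy rest (pvTake t r).2 := by
  intro t r
  fun_induction pvTake t r with
  | case1 r h p ih =>
    rw [pvGreedy]
    simp only [h, dif_pos]
    rw [ih]
    rfl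
  | case2 r h =>
    rw [pvGreedy]
    simp [h]

theorem pvLoopB_eq_greedy : ∀ (l : List Int) (r : Int), pvLoopB l r = pvGreedy l r := by
  intro l
  induction l with
  | nil => intro r; rw [pvLoopB, pvGreedy]
  | cons t rest ih =>
    intro r
    rw [pvLoopB, pvGreedy_take]
    simp [ih]

theorem pvGreedy_prefix : ∀ (E l : List Int) (r : Int), (∀ x ∈ E, r < x) →
    pvGreedy (E ++ l) r = pvGreedy l r := by
  intro E
  induction E with
  | nil => simp
  | cons t rest ih =>
    intro l r hE
    have ht : r < t := hE t (by simp)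
    rw [List.cons_append, pvGreedy]
    simp only [show ¬ (0 < t ∧ t ≤ r) by omega, dif_neg, not_false_iff]
    exact ih l r (fun x hx => hE x (by simp [hx]))

-- ===== VERDICT (by name: the statement is the Claim_ definition above) =====
theorem split_into_triangle_components_spec : Claim_equal_split_into_triangle_components := by
  intro num _
  unfold Spec_split_into_triangle_components
  unfold split_into_triangle_components split_into_triangle_components_alt
  simp only [pvGenA_eq]
  obtain ⟨E, hE1, hE2⟩ := pvDecomp num (num - 0).toNat 0 0 (by omega) (by omega)
  have hpos : ∀ x ∈ (pvGA2 1 (num + 1) 0).reverse, 0 < x := by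
    intro x hx
    exact pvGA2_pos 1 (num + 1) 0 (by omega) (by omega) x (List.mem_reverse.mp hx)
  have h1 : 0 < num → (1 : Int) ∈ (pvGA2 1 (num + 1) 0).reverse := by
    intro hn
    exact List.mem_reverse.mpr (pvGA2_one_mem num hn)
  rw [pvCoreA_eq_greedy _ num hpos h1, pvLoopB_eq_greedy]
  norm_num at hE1
  rw [hE1, List.reverse_append]
  exact pvGreedy_prefix E.reverse _ num (fun x hx => hE2 x (List.mem_reverse.mp hx))
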